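-- pv_equiv track=rewrite | github.com/ThomasGust/Mendelian | mendelian_backend/mendelian.py | create_punnet_square_gene_indices
-- ===== SOURCE A (Python) =====
-- def get_combinations(p):
--   if len(p) == 1:
--     return [p[0][0], p[0][1]]
--
--   else:
--     g = []
--     for a in get_combinations(p[1:]):
--       g.append(p[0][0]+a)
--       g.append(p[0][1]+a)
--
--     return g
--
-- def create_punnet_square_gene_indices(p1, p2, gene_indices):
--   assert len(p1) == len(p2)
--
--   np1 = []
--   np2 = []
--
--   for i, g in enumerate(p1):
--     if i in gene_indices:
--       np1.append(g)
--
--   for i, g in enumerate(p2):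
--     if i in gene_indices:
--       np2.append(g)
--
--   p1 = np1
--   p2 = np2
--
--   comb1 = get_combinations(p1)
--   comb2 = get_combinations(p2)
--
--   arr = [[[] for i in range(len(comb2))] for i in range(len(comb1))]
--   for i, a in enumerate(comb1):
--     for j, aj in enumerate(comb2):
--       arr[i][j] = f"{a}{aj}"
--   return arr
-- ===== SOURCE B (Python) =====
-- from itertools import product
--
-- def create_punnet_square_gene_indices(p1, p2, gene_indices):
--     assert len(p1) == len(p2)
--     idx = set(gene_indices)
--     np1 = [g for i, g in enumerate(p1) if i in idx]
--     np2 = [g for i, g in enumerate(p2) if i in idx]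
--     comb1 = [''.join(reversed(t)) for t in product(*reversed(np1))]
--     comb2 = [''.join(reversed(t)) for t in product(*reversed(np2))]
--     return [[a + b for b in comb2] for a in comb1]
-- ===== Notes on version B (the rewrite author's own statement) =====
-- stated objective: idiomatic
-- what changed: The hand-written recursive allele-combination builder is replaced by itertools.product over the reversed gene list (joining each tuple reversed so the first gene still varies fastest), filtering uses comprehensions with a set of indices, and the grid is a nested comprehension instead of pre-allocating and overwriting a 2D array.
import Mathlib
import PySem

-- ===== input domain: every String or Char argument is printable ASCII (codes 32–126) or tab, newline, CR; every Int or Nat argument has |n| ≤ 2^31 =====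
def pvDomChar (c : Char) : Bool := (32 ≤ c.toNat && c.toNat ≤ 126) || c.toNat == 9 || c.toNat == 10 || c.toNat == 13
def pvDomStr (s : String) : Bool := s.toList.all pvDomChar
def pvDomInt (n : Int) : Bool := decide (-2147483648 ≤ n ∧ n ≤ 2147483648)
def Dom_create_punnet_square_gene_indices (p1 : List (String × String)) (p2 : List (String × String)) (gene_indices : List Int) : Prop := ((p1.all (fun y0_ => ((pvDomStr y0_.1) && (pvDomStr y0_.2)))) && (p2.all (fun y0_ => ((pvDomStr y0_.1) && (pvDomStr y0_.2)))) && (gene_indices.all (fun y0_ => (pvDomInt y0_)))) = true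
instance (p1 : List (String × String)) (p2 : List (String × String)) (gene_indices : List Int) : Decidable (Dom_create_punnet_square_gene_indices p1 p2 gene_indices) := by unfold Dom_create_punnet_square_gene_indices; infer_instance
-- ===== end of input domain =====

-- B replaces the recursive combination builder with an iterative cartesian product
-- (reversed so the first gene varies fastest) and comprehension-style filtering/grid building (idiomatic).


-- ===== PORT A =====
-- get_combinations; on [] the Python recurses forever (RecursionError), so [] is
-- excluded by Pre_ and the [] equation is only a totality guard.
def get_combinations : List (String × String) → List String
  | [] => []
  | [g] => [g.1, g.2]
  | g :: rest => (get_combinations rest).foldl (fun acc a => acc ++ [g.1 ++ a, g.2 ++ a]) []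

def create_punnet_square_gene_indices (p1 : List (String × String)) (p2 : List (String × String)) (gene_indices : List Int) : List (List String) :=
  -- assert len(p1) == len(p2): raises when unequal, excluded by Pre_
  let np1 := (PySem.List.enumerate p1).foldl (fun acc ig => if gene_indices.contains ig.1 then acc ++ [ig.2] else acc) []
  let np2 := (PySem.List.enumerate p2).foldl (fun acc ig => if gene_indices.contains ig.1 then acc ++ [ig.2] else acc) []
  let comb1 := get_combinations np1
  let comb2 := get_combinations np2
  -- arr is pre-allocated then every cell arr[i][j] is overwritten in order; ported as
  -- appending each fully built row (each cell is written exactly once, row-major)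
  comb1.foldl (fun arr a => arr ++ [comb2.foldl (fun row aj => row ++ [a ++ aj]) []]) []

-- ===== PORT B =====
-- product(*reversed(np)): tuples of one allele per gene, last listed gene varies fastest
def pyProductPairs : List (String × String) → List (List String)
  | [] => [[]]
  | g :: rest => [g.1, g.2].flatMap (fun x => (pyProductPairs rest).map (fun t => x :: t))

-- ''.join(reversed(t))
def joinRev (t : List String) : String := PySem.Str.join "" t.reverse

def create_punnet_square_gene_indices_alt (p1 : List (String × String)) (p2 : List (String × String)) (gene_indices : List Int) : List (List String) :=
  let idx := PySem.Set.ofList gene_indices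
  let np1 := ((PySem.List.enumerate p1).filter (fun ig => PySem.Set.contains idx ig.1)).map (·.2)
  let np2 := ((PySem.List.enumerate p2).filter (fun ig => PySem.Set.contains idx ig.1)).map (·.2)
  let comb1 := (pyProductPairs np1.reverse).map joinRev
  let comb2 := (pyProductPairs np2.reverse).map joinRev
  comb1.map (fun a => comb2.map (fun b => a ++ b))

-- ===== PRECONDITION & SPEC =====
-- Pre_ excludes inputs where A raises: unequal lengths (AssertionError) and
-- equal-length inputs where no index of the lists occurs in gene_indices
-- (get_combinations recurses forever on [] → RecursionError).
def Pre_create_punnet_square_gene_indices (p1 : List (String × String)) (p2 : List (String × String)) (gene_indices : List Int) : Prop :=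
  p1.length = p2.length ∧ ∃ i < p1.length, (i : Int) ∈ gene_indices
instance (p1 : List (String × String)) (p2 : List (String × String)) (gene_indices : List Int) : Decidable (Pre_create_punnet_square_gene_indices p1 p2 gene_indices) := by unfold Pre_create_punnet_square_gene_indices; infer_instance

def pvWitness_create_punnet_square_gene_indices : (List (String × String)) × (List (String × String)) × List Int :=
  ([("A", "a"), ("B", "b")], [("A", "a"), ("b", "b")], [0, 1])

def Spec_create_punnet_square_gene_indices (p1 : List (String × String)) (p2 : List (String × String)) (gene_indices : List Int) (out : List (List String)) : Prop := out = create_punnet_square_gene_indices_alt p1 p2 gene_indices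
instance (p1 : List (String × String)) (p2 : List (String × String)) (gene_indices : List Int) (out : List (List String)) : Decidable (Spec_create_punnet_square_gene_indices p1 p2 gene_indices out) := by unfold Spec_create_punnet_square_gene_indices; infer_instance

-- ===== CLAIM (what is proved, stated in full; the proofs are below) =====
def Claim_equal_create_punnet_square_gene_indices : Prop := ∀ (p1 : List (String × String)) (p2 : List (String × String)) (gene_indices : List Int), Dom_create_punnet_square_gene_indices p1 p2 gene_indices → Pre_create_punnet_square_gene_indices p1 p2 gene_indices → Spec_create_punnet_square_gene_indices p1 p2 gene_indices (create_punnet_square_gene_indices p1 p2 gene_indices)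



-- ===== LEMMAS AND PROOFS =====

-- ''-join with empty separator peels off the head
theorem chars_join_nil_cons (p : List Char) (rest : List (List Char)) :
    PySem.Chars.join [] (p :: rest) = p ++ PySem.Chars.join [] rest := by
  cases rest with
  | nil => simp [PySem.Chars.join, List.intercalate]
  | cons q r => rw [PySem.Chars.join_cons_cons]; simp

theorem str_join_nil_cons (x : String) (l : List String) :
    PySem.Str.join "" (x :: l) = x ++ PySem.Str.join "" l := by
  simp [PySem.Str.join, chars_join_nil_cons]

-- the filtered lists of the two ports coincide
theorem np_eq (p : List (String × String)) (gi : List Int) :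
    (PySem.List.enumerate p).foldl (fun acc ig => if gi.contains ig.1 then acc ++ [ig.2] else acc) [] =
    ((PySem.List.enumerate p).filter (fun ig => PySem.Set.contains (PySem.Set.ofList gi) ig.1)).map (·.2) := by
  rw [PySem.List.foldl_append_if]
  simp only [List.nil_append]
  congr 1
  apply List.filter_congr
  intro ig _
  simp [PySem.Set.contains]

-- ''.join(reversed(t ++ [x])) = x + ''.join(reversed(t))
theorem joinRev_append (t : List String) (x : String) : joinRev (t ++ [x]) = x ++ joinRev t := by
  simp [joinRev, str_join_nil_cons]

theorem pyProductPairs_append (xs : List (String × String)) (g : String × String) :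
    pyProductPairs (xs ++ [g]) = (pyProductPairs xs).flatMap (fun t => [t ++ [g.1], t ++ [g.2]]) := by
  induction xs with
  | nil => simp [pyProductPairs]
  | cons h rest ih => simp [pyProductPairs, ih, List.map_flatMap, List.flatMap_map]

-- the recursive builder equals the reversed-product formulation on nonempty input
theorem comb_eq : (np : List (String × String)) → np ≠ [] → get_combinations np = (pyProductPairs np.reverse).map joinRev
  | [g], _ => by
    simp [get_combinations, pyProductPairs, joinRev, PySem.Str.join]
  | g :: h :: rest, _ => by
    have ih := comb_eq (h :: rest) (by simp)
    show (get_combinations (h :: rest)).foldl (fun acc a => acc ++ [g.1 ++ a, g.2 ++ a]) [] = _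
    rw [PySem.List.foldl_append_eq_flatMap, ih,
        show (g :: h :: rest).reverse = (h :: rest).reverse ++ [g] by simp,
        pyProductPairs_append]
    simp [List.map_flatMap, List.flatMap_map, joinRev_append]

-- the filtered list is nonempty when some index of p is in gi
theorem np_ne_nil (p : List (String × String)) (gi : List Int)
    (h : ∃ i < p.length, (i : Int) ∈ gi) :
    ((PySem.List.enumerate p).filter (fun ig => PySem.Set.contains (PySem.Set.ofList gi) ig.1)).map (·.2) ≠ [] := by
  obtain ⟨i, hi, hmem⟩ := h
  have hme : ((i : Int), p[i]) ∈ PySem.List.enumerate p := by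
    rw [PySem.List.mem_enumerate_iff]
    exact ⟨i, hi, by simp⟩
  have hmf : ((i : Int), p[i]) ∈ (PySem.List.enumerate p).filter (fun ig => PySem.Set.contains (PySem.Set.ofList gi) ig.1) :=
    List.mem_filter.2 ⟨hme, by simp [PySem.Set.contains, hmem]⟩
  intro hnil
  rw [List.map_eq_nil_iff] at hnil
  rw [hnil] at hmf
  exact List.not_mem_nil hmf

-- ===== VERDICT (by name: the statement is the Claim_ definition above) =====
theorem create_punnet_square_gene_indices_spec : Claim_equal_create_punnet_square_gene_indices := by
  intro p1 p2 gi _ hpre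
  obtain ⟨hlen, hex⟩ := hpre
  unfold Spec_create_punnet_square_gene_indices create_punnet_square_gene_indices create_punnet_square_gene_indices_alt
  simp only [np_eq]
  rw [comb_eq _ (np_ne_nil p1 gi hex), comb_eq _ (np_ne_nil p2 gi (hlen ▸ hex))]
  simp only [PySem.List.foldl_append_singleton_eq_map, List.nil_append]
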